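-- pv_equiv track=rewrite | github.com/ashishmh/leetcode-python | test.py | Solve
-- ===== SOURCE A (Python) =====
-- def IsPrefix(x,y):
-- 	if len(y) > len(x):
-- 		return False
-- 	for i in range(len(y)):
-- 		if x[i] != y[i]:
-- 			return False
-- 	return True
--
-- def Solve(str, words):
-- 	if len(str) == 0 and len(words) == 0:
-- 		return True
--
-- 	for i, w in enumerate(words):
-- 		if IsPrefix(str, w):
-- 			result = Solve(str[len(w):], words[0: i] + words[i + 1:])
-- 			if result:
-- 				return result
-- 	return False
-- ===== SOURCE B (Python) =====
-- def Solve(str, words):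
--     # Bottom-up dynamic programming over bitmasks of used words (no recursion):
--     # dp[mask] is True iff some ordering of the words in `mask` concatenates to
--     # the prefix of `str` of length pos(mask) = sum of their lengths.
--     n = len(words)
--     if sum(len(w) for w in words) != len(str):
--         return False
--     size = 1 << n
--     dp = [False] * size
--     dp[0] = True
--     for mask in range(size):
--         if dp[mask]:
--             pos = sum(len(words[j]) for j in range(n) if (mask >> j) & 1)
--             for j in range(n):
--                 if not ((mask >> j) & 1) and str[pos:pos + len(words[j])] == words[j]:
--                     dp[mask | (1 << j)] = True
--     return dp[size - 1]
-- ===== Notes on version B (the rewrite author's own statement) =====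
-- stated objective: alternative
-- what changed: B replaces A's recursive backtracking over permutations (slicing the word list at every level) by an iterative bottom-up dynamic program over bitmasks of used words: a table dp indexed by subsets, filled in increasing mask order, with the match position recovered as the total length of the words in the mask; no recursion at all.
import Mathlib
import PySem

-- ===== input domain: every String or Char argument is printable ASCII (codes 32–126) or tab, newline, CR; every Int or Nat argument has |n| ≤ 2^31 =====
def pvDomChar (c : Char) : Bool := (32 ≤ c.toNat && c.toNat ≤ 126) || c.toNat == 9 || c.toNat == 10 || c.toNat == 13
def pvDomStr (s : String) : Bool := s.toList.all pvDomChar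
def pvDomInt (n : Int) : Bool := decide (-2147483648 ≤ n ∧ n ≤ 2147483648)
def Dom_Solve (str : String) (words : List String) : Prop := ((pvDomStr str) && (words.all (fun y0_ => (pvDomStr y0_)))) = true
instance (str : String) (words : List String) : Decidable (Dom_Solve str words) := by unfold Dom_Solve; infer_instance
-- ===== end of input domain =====

-- B replaces A's recursive backtracking over permutations by an iterative bottom-up
-- dynamic program over bitmasks of used words (a table filled in increasing mask order).

-- ===== PORT A =====

def IsPrefix (x y : String) : Bool :=
  if PySem.Str.len x < PySem.Str.len y then false
  else
    -- for i in range(len(y)): if x[i] != y[i]: return False  (indices always in range here)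
    (PySem.List.pyRange 0 (PySem.Str.len y) 1).all fun i =>
      PySem.Str.pyGet? x i == PySem.Str.pyGet? y i

def Solve (str : String) (words : List String) : Bool :=
  if PySem.Str.len str == 0 && words.length == 0 then true
  else
    -- for i, w in enumerate(words): … early return of the first truthy recursive result = any
    (PySem.List.enumerate words).attach.any fun ⟨(i, w), _h⟩ =>
      IsPrefix str w &&
        Solve (PySem.Str.slice str (some (PySem.Str.len w)) none)
              (PySem.List.slice words none (some i) ++ PySem.List.slice words (some (i + 1)) none)
termination_by words.length
decreasing_by
  obtain ⟨k, hk, hp⟩ := (PySem.List.mem_enumerate_iff _ _ _).mp _h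
  simp only [Prod.mk.injEq] at hp
  obtain ⟨rfl, rfl⟩ := hp
  simp only [zero_add]
  rw [show ((k : Int) + 1) = ((k + 1 : Nat) : Int) by push_cast; ring,
      PySem.List.slice_to_natCast, PySem.List.slice_from_natCast,
      ← List.eraseIdx_eq_take_drop_succ, List.length_eraseIdx_of_lt hk]
  omega

-- ===== PORT B =====
-- Source B, step for step.  The loop indices `mask` and `j` of range(size) / range(n) are
-- nonnegative, so they are carried as Nat; Python's `(mask >> j) & 1` (an int used as a
-- truth value) is Nat.testBit mask j, and `mask | (1 << j)` is `mask ||| (1 <<< j)`.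

-- body of the inner `for j in range(n)` loop: conditionally set dp[mask | 1 << j]
def altInner (str : String) (words : List String) (mask : Nat) (pos : Int) (dp : List Bool) : List Bool :=
  (List.range words.length).foldl (fun dp j =>
    if !(mask.testBit j) &&
       (PySem.Str.slice str (some pos) (some (pos + PySem.Str.len (words.getD j ""))) == words.getD j "")
    then dp.set (mask ||| (1 <<< j)) true else dp) dp

-- pos = sum(len(words[j]) for j in range(n) if (mask >> j) & 1)
def altPos (words : List String) (mask : Nat) : Int :=
  ((List.range words.length).filter (fun j => mask.testBit j)).foldl
    (fun a j => a + PySem.Str.len (words.getD j "")) 0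

-- body of the outer `for mask in range(size)` loop
def altStep (str : String) (words : List String) (dp : List Bool) (mask : Nat) : List Bool :=
  if dp.getD mask false then altInner str words mask (altPos words mask) dp else dp

def Solve_alt (str : String) (words : List String) : Bool :=
  if (words.map PySem.Str.len).sum != PySem.Str.len str then false
  else
    let size := 2 ^ words.length
    let dp := (List.range size).foldl (altStep str words)
                ((List.replicate size false).set 0 true)   -- dp = [False]*size; dp[0] = True
    dp.getD (size - 1) false

-- ===== PRECONDITION & SPEC =====
def Spec_Solve (str : String) (words : List String) (out : Bool) : Prop := out = Solve_alt str words
instance (str : String) (words : List String) (out : Bool) : Decidable (Spec_Solve str words out) := by unfold Spec_Solve; infer_instance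

-- ===== CLAIM (what is proved, stated in full; the proofs are below) =====
def Claim_equal_Solve : Prop := ∀ (str : String) (words : List String), Dom_Solve str words → Spec_Solve str words (Solve str words)

-- ===== LEMMAS AND PROOFS =====

-- Both programs decide: some permutation of `words` concatenates to the string.
def ConcatPerm (cs : List Char) (ws : List String) : Prop :=
  ∃ l : List String, l.Perm ws ∧ (l.map String.toList).flatten = cs

theorem isPrefix_iff (x y : String) : IsPrefix x y = true ↔ y.toList <+: x.toList := by
  unfold IsPrefix
  simp only [PySem.Str.len_eq]
  split_ifs with h
  · simp only [false_iff]
    intro hpre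
    have := hpre.length_le
    simp only [Nat.cast_lt] at h
    omega
  · simp only [List.all_eq_true, PySem.List.mem_pyRange_one, beq_iff_eq, and_imp]
    constructor
    · intro hall
      rw [List.prefix_iff_eq_take]
      apply List.ext_getElem?
      intro i
      rcases lt_or_ge i y.toList.length with hi | hi
      · have := hall (i : Int) (by positivity) (by exact_mod_cast hi)
        simp only [PySem.Str.pyGet?_natCast] at this
        rw [List.getElem?_take_of_lt hi, this]
      · rw [List.getElem?_eq_none (by simpa using hi),
            List.getElem?_eq_none (by simpa using (Or.inl hi : y.toList.length ≤ i ∨ x.toList.length ≤ i))]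
    · intro hpre i hi0 hiy
      obtain ⟨j, rfl⟩ : ∃ j : Nat, i = (j : Int) := ⟨i.toNat, (Int.toNat_of_nonneg hi0).symm⟩
      have hj : j < y.toList.length := by exact_mod_cast hiy
      obtain ⟨t, ht⟩ := hpre
      simp only [PySem.Str.pyGet?_natCast]
      rw [← ht, List.getElem?_append_left hj]

theorem solveA_iff : ∀ n, ∀ ws : List String, ws.length < n → ∀ s : String,
    (Solve s ws = true ↔ ConcatPerm s.toList ws) := by
  intro n
  induction n with
  | zero => intro ws h; omega
  | succ n IH =>
    intro ws hlen s
    unfold Solve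
    by_cases hws : ws = []
    · subst hws
      simp only [PySem.Str.len_eq, PySem.List.enumerate_nil, List.attach_nil, List.any_nil,
        List.length_nil]
      constructor
      · intro h
        split_ifs at h with hc
        · simp only [Bool.and_eq_true, beq_iff_eq, Nat.cast_eq_zero,
            List.length_eq_zero_iff] at hc
          exact ⟨[], List.Perm.refl _, hc.1.symm⟩
      · rintro ⟨l, hperm, hflat⟩
        rw [List.perm_nil] at hperm
        subst hperm
        simp only [List.map_nil, List.flatten_nil] at hflat
        rw [← hflat]
        simp
    · have hcond : (PySem.Str.len s == 0 && ws.length == 0) = false := by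
        simp [List.length_eq_zero_iff, hws]
      rw [hcond, if_neg (by simp)]
      simp only [List.any_eq_true, List.mem_attach, true_and, Subtype.exists, Prod.exists,
        Bool.and_eq_true, isPrefix_iff]
      constructor
      · rintro ⟨i, w, hmem, hpre, hrec⟩
        obtain ⟨k, hk, hp⟩ := (PySem.List.mem_enumerate_iff _ _ _).mp hmem
        simp only [Prod.mk.injEq] at hp
        obtain ⟨rfl, rfl⟩ := hp
        simp only [zero_add] at hrec
        rw [show ((k : Int) + 1) = ((k + 1 : Nat) : Int) by push_cast; ring] at hrec
        rw [PySem.List.slice_to_natCast, PySem.List.slice_from_natCast,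
            ← List.eraseIdx_eq_take_drop_succ] at hrec
        have hrec' := (IH _ (by rw [List.length_eraseIdx_of_lt hk]; omega) _).mp hrec
        obtain ⟨l', hperm, hflat⟩ := hrec'
        refine ⟨ws[k] :: l', (hperm.cons _).trans (List.getElem_cons_eraseIdx_perm hk), ?_⟩
        simp only [List.map_cons, List.flatten_cons]
        rw [hflat]
        simp only [PySem.Str.len_eq, PySem.Str.toList_slice, PySem.Chars.slice_eq_listSlice,
          PySem.List.slice_from_natCast]
        obtain ⟨t, ht⟩ := hpre
        rw [← ht, List.drop_left]
      · rintro ⟨l, hperm, hflat⟩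
        obtain ⟨w, l', rfl⟩ : ∃ w l', l = w :: l' := by
          cases l with
          | nil => exact absurd (List.perm_nil.mp hperm.symm) hws
          | cons a t => exact ⟨a, t, rfl⟩
        have hwmem : w ∈ ws := hperm.mem_iff.mp List.mem_cons_self
        have hk : ws.idxOf w < ws.length := List.idxOf_lt_length_of_mem hwmem
        simp only [List.map_cons, List.flatten_cons] at hflat
        have hpre : w.toList <+: s.toList := ⟨(l'.map String.toList).flatten, hflat⟩
        refine ⟨(0 : Int) + (ws.idxOf w : Int), ws[ws.idxOf w], ?_, ?_, ?_⟩
        · exact (PySem.List.mem_enumerate_iff _ _ _).mpr ⟨ws.idxOf w, hk, rfl⟩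
        · rw [List.getElem_idxOf hk]; exact hpre
        · rw [show ((0 : Int) + ((ws.idxOf w : Nat) : Int)) = ((ws.idxOf w : Nat) : Int) by ring,
              show (((ws.idxOf w : Nat) : Int) + 1) = ((ws.idxOf w + 1 : Nat) : Int) by push_cast; ring,
              PySem.List.slice_to_natCast, PySem.List.slice_from_natCast,
              ← List.eraseIdx_eq_take_drop_succ]
          apply (IH _ (by rw [List.length_eraseIdx_of_lt hk]; omega) _).mpr
          rw [List.eraseIdx_idxOf_eq_erase, List.getElem_idxOf hk]
          refine ⟨l', (List.cons_perm_iff_perm_erase.mp hperm).2, ?_⟩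
          simp only [PySem.Str.len_eq, PySem.Str.toList_slice, PySem.Chars.slice_eq_listSlice,
            PySem.List.slice_from_natCast]
          rw [← hflat, List.drop_left]

-- ---- B-side vocabulary ----

def wlen (words : List String) (j : Nat) : Nat := (words.getD j "").toList.length

-- the indices in a mask
def bidx (n mask : Nat) : List Nat := (List.range n).filter (fun j => mask.testBit j)

-- the string position a mask stands for: total length of its words
def bpos (words : List String) (n mask : Nat) : Nat := ((bidx n mask).map (wlen words)).sum

-- words[j] occurs in s at position p
def WMatch (s : List Char) (words : List String) (j p : Nat) : Prop :=
  (words.getD j "").toList = (s.drop p).take (wlen words j)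

-- dp[mask]'s meaning: some ordering of the words in mask spells the prefix of length bpos
def OKm (s : List Char) (words : List String) (n mask : Nat) : Prop :=
  ∃ l : List Nat, l.Perm (bidx n mask) ∧
    (l.map (fun j => (words.getD j "").toList)).flatten = s.take (bpos words n mask)

theorem filter_or_perm : ∀ (l : List Nat), l.Nodup → ∀ (j : Nat), j ∈ l → ∀ (p : Nat → Bool), p j = false →
    (l.filter (fun i => p i || i == j)).Perm (j :: l.filter p) := by
  intro l
  induction l with
  | nil => intro _ j hj; simp at hj
  | cons a t IH =>
    intro hnd j hj p hp
    rcases List.mem_cons.mp hj with rfl | hjt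
    · have hnt : j ∉ t := (List.nodup_cons.mp hnd).1
      have : t.filter (fun i => p i || i == j) = t.filter p := by
        apply List.filter_congr
        intro i hi
        have : i ≠ j := fun h => hnt (h ▸ hi)
        simp [this]
      simp only [List.filter_cons, hp, BEq.rfl, Bool.or_true, if_true, this]
      simp
    · have haj : a ≠ j := by rintro rfl; exact (List.nodup_cons.mp hnd).1 hjt
      have IH' := IH (List.nodup_cons.mp hnd).2 j hjt p hp
      have haj' : (a == j) = false := by simp [haj]
      cases hpa : p a with
      | true =>
        simp only [List.filter_cons, hpa, haj', Bool.or_false, if_true]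
        exact (IH'.cons a).trans (List.Perm.swap j a _)
      | false =>
        simp only [List.filter_cons, hpa, haj', Bool.or_false, Bool.false_eq_true, if_false]
        exact IH'

theorem testBit_or_shift (mask j i : Nat) :
    (mask ||| (1 <<< j)).testBit i = (mask.testBit i || i == j) := by
  rw [Nat.testBit_or, Nat.one_shiftLeft, Nat.testBit_two_pow]
  by_cases hij : j = i
  · simp [hij]
  · have : i ≠ j := fun h => hij h.symm
    simp [hij, this]

theorem bidx_or_perm {n j mask : Nat} (hj : j < n) (hb : mask.testBit j = false) :
    (bidx n (mask ||| (1 <<< j))).Perm (j :: bidx n mask) := by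
  unfold bidx
  rw [List.filter_congr (fun i _ => testBit_or_shift mask j i)]
  exact filter_or_perm _ (List.nodup_range) j (List.mem_range.mpr hj) _ hb

theorem bpos_or (words : List String) {n j mask : Nat} (hj : j < n) (hb : mask.testBit j = false) :
    bpos words n (mask ||| (1 <<< j)) = wlen words j + bpos words n mask := by
  unfold bpos
  rw [((bidx_or_perm hj hb).map (wlen words)).sum_eq]
  simp

theorem lt_or_shift {m' j : Nat} (hb : m'.testBit j = false) : m' < m' ||| (1 <<< j) := by
  rcases Nat.lt_or_ge m' (m' ||| (1 <<< j)) with h | h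
  · exact h
  · exfalso
    have he : m' = m' ||| (1 <<< j) := le_antisymm Nat.left_le_or h
    have := testBit_or_shift m' j j
    rw [← he, hb] at this
    simp at this

theorem bidx_zero (n : Nat) : bidx n 0 = [] := by
  simp [bidx, Nat.zero_testBit]

theorem okm_zero (s : List Char) (words : List String) (n : Nat) : OKm s words n 0 := by
  exact ⟨[], by simp [bidx_zero], by simp [bpos, bidx_zero]⟩

-- flatten length of an index list = its bpos-style sum
theorem flatten_len (words : List String) (l : List Nat) :
    ((l.map (fun j => (words.getD j "").toList)).flatten).length = (l.map (wlen words)).sum := by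
  rw [List.length_flatten, List.map_map]
  rfl

theorem testBit_lt_n {n mask j : Nat} (hm : mask < 2 ^ n) (hb : mask.testBit j = true) : j < n := by
  by_contra h
  rw [Nat.testBit_eq_false_of_lt
    (lt_of_lt_of_le hm (Nat.pow_le_pow_right (by norm_num) (Nat.le_of_not_lt h)))] at hb
  exact Bool.false_ne_true hb

-- the DP recurrence: a nonempty mask is OK iff it is OK after peeling off a last word
theorem okm_rec {s : List Char} {words : List String} {n mask : Nat} (hm : mask < 2 ^ n) :
    OKm s words n mask ↔ (mask = 0 ∨ ∃ j m', j < n ∧ m'.testBit j = false ∧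
      mask = m' ||| (1 <<< j) ∧ OKm s words n m' ∧ WMatch s words j (bpos words n m')) := by
  constructor
  · rintro ⟨l, hperm, hflat⟩
    by_cases hmask : mask = 0
    · exact Or.inl hmask
    right
    have hl : l ≠ [] := by
      rintro rfl
      obtain ⟨j, hbj⟩ := Nat.exists_testBit_of_ne_zero hmask
      have hj : j < n := testBit_lt_n hm hbj
      have : j ∈ bidx n mask := List.mem_filter.mpr ⟨List.mem_range.mpr hj, hbj⟩
      rw [List.perm_nil.mp hperm.symm] at this
      simp at this
    set j := l.getLast hl with hjdef
    have hjmem : j ∈ bidx n mask := hperm.mem_iff.mp (List.getLast_mem hl)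
    have hjn : j < n := List.mem_range.mp (List.mem_filter.mp hjmem).1
    have hbj : mask.testBit j = true := (List.mem_filter.mp hjmem).2
    set m' := mask ^^^ (1 <<< j) with hm'def
    have hself : (1 <<< j).testBit j = true := by
      rw [Nat.one_shiftLeft, Nat.testBit_two_pow]; simp
    have hb' : m'.testBit j = false := by
      rw [hm'def, Nat.testBit_xor, hbj, hself]; rfl
    have hor : mask = m' ||| (1 <<< j) := by
      apply Nat.eq_of_testBit_eq
      intro i
      rw [testBit_or_shift, hm'def, Nat.testBit_xor, Nat.one_shiftLeft, Nat.testBit_two_pow]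
      by_cases hij : j = i
      · subst hij; rw [hbj]; simp
      · have : i ≠ j := fun h => hij h.symm
        simp [hij, this]
    have hpermor : (bidx n mask).Perm (j :: bidx n m') := by
      rw [hor]; exact bidx_or_perm hjn hb'
    have hld : l.dropLast ++ [j] = l := List.dropLast_concat_getLast hl
    have hpermd : l.dropLast.Perm (bidx n m') := by
      have h1 : (j :: l.dropLast).Perm (j :: bidx n m') :=
        ((List.perm_append_singleton _ _).symm.trans (by rw [hld]; exact hperm)).trans hpermor
      exact h1.cons_inv
    have hbp : bpos words n mask = wlen words j + bpos words n m' := by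
      rw [hor]; exact bpos_or words hjn hb'
    -- split the flatten equation
    have hsum : (l.map (wlen words)).sum = bpos words n mask :=
      ((hperm.map (wlen words)).sum_eq)
    have hlen : bpos words n mask ≤ s.length := by
      have := congrArg List.length hflat
      rw [flatten_len, hsum, List.length_take] at this
      omega
    have hsumd : (l.dropLast.map (wlen words)).sum = bpos words n m' :=
      (hpermd.map (wlen words)).sum_eq
    rw [← hld] at hflat
    simp only [List.map_append, List.flatten_append, List.map_cons, List.map_nil,
      List.flatten_cons, List.flatten_nil, List.append_nil] at hflat
    rw [hbp, Nat.add_comm, List.take_add] at hflat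
    have hsplit := List.append_inj hflat (by
      rw [flatten_len, hsumd, List.length_take]
      omega)
    exact ⟨j, m', hjn, hb', hor, ⟨l.dropLast, hpermd, hsplit.1⟩, hsplit.2⟩
  · rintro (rfl | ⟨j, m', hjn, hb', rfl, ⟨l, hperm, hflat⟩, hmatch⟩)
    · exact okm_zero s words n
    refine ⟨l ++ [j], ?_, ?_⟩
    · exact (List.perm_append_singleton _ _).trans
        ((hperm.cons j).trans (bidx_or_perm hjn hb').symm)
    · simp only [List.map_append, List.flatten_append, List.map_cons, List.map_nil,
        List.flatten_cons, List.flatten_nil, List.append_nil]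
      rw [hflat, bpos_or words hjn hb', Nat.add_comm, List.take_add, hmatch]

-- ---- the fold computes OKm ----

def GoodUpTo (s : List Char) (words : List String) (n m k : Nat) : Prop :=
  k = 0 ∨ ∃ j m', j < n ∧ m'.testBit j = false ∧ k = m' ||| (1 <<< j) ∧ m' < m ∧
    OKm s words n m' ∧ WMatch s words j (bpos words n m')

-- the init dp: [False]*size with dp[0] = True
theorem dp0_getD (N k : Nat) (hk : k < N) :
    ((List.replicate N false).set 0 true).getD k false = decide (k = 0) := by
  cases k with
  | zero =>
    rw [List.getD_eq_getElem?_getD, List.getElem?_set_self (by simpa using hk)]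
    simp
  | succ k =>
    rw [List.getD_eq_getElem?_getD, List.getElem?_set_ne (by omega)]
    simp [hk]

-- the inner-loop condition is: bit j unused and words[j] matches at position p
theorem cond_iff (str : String) (words : List String) (mask j p : Nat) :
    ((!(mask.testBit j) &&
      (PySem.Str.slice str (some ((p : Nat) : Int))
        (some (((p : Nat) : Int) + PySem.Str.len (words.getD j ""))) == words.getD j "")) = true)
    ↔ (mask.testBit j = false ∧ WMatch str.toList words j p) := by
  rw [Bool.and_eq_true, Bool.not_eq_true']
  apply and_congr Iff.rfl
  rw [beq_iff_eq, String.ext_iff]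
  have hslice : (PySem.Str.slice str (some ((p : Nat) : Int))
      (some (((p : Nat) : Int) + PySem.Str.len (words.getD j "")))).toList
      = (str.toList.drop p).take (wlen words j) := by
    simp only [PySem.Str.len_eq, PySem.Str.toList_slice, PySem.Chars.slice_eq_listSlice]
    exact PySem.List.slice_natCast_add _ _ _
  rw [hslice]
  unfold WMatch
  exact eq_comm

-- pos = sum(...) computes bpos
theorem altPos_eq (words : List String) (mask : Nat) :
    altPos words mask = ((bpos words words.length mask : Nat) : Int) := by
  unfold altPos bpos bidx
  rw [PySem.List.foldl_add]
  simp only [zero_add]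
  have h1 : ((List.range words.length).filter (fun j => mask.testBit j)).map
      (fun j => PySem.Str.len (words.getD j "")) =
      ((List.range words.length).filter (fun j => mask.testBit j)).map
      (fun j => ((wlen words j : Nat) : Int)) := by
    apply List.map_congr_left
    intro j _
    simp [wlen]
  rw [h1]
  push_cast
  rw [List.map_map]
  rfl

-- the inner loop, truncated to its first t iterations
theorem inner_inv (str : String) (words : List String) (mask p : Nat)
    (hmask : mask < 2 ^ words.length) :
    ∀ t, t ≤ words.length → ∀ dp : List Bool, dp.length = 2 ^ words.length →
    ∀ P : Nat → Prop, (∀ k, k < 2 ^ words.length → (dp.getD k false = true ↔ P k)) →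
    (((List.range t).foldl (fun dp j =>
        if !(mask.testBit j) &&
           (PySem.Str.slice str (some ((p : Nat) : Int))
             (some (((p : Nat) : Int) + PySem.Str.len (words.getD j ""))) == words.getD j "")
        then dp.set (mask ||| (1 <<< j)) true else dp) dp).length = 2 ^ words.length ∧
    ∀ k, k < 2 ^ words.length →
      (((List.range t).foldl (fun dp j =>
          if !(mask.testBit j) &&
             (PySem.Str.slice str (some ((p : Nat) : Int))
               (some (((p : Nat) : Int) + PySem.Str.len (words.getD j ""))) == words.getD j "")
          then dp.set (mask ||| (1 <<< j)) true else dp) dp).getD k false = true ↔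
        P k ∨ ∃ j, j < t ∧ mask.testBit j = false ∧ WMatch str.toList words j p ∧
          k = mask ||| (1 <<< j))) := by
  intro t
  induction t with
  | zero =>
    intro _ dp hlen P hP
    refine ⟨by simpa using hlen, ?_⟩
    intro k hk
    simp only [List.range_zero, List.foldl_nil]
    rw [hP k hk]
    constructor
    · exact Or.inl
    · rintro (h | ⟨j, hj, _⟩)
      · exact h
      · omega
  | succ t IH =>
    intro ht dp hlen P hP
    obtain ⟨hlenE, hinvE⟩ := IH (by omega) dp hlen P hP
    rw [List.range_succ, List.foldl_append, List.foldl_cons, List.foldl_nil]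
    cases hC : (!(mask.testBit t) &&
        (PySem.Str.slice str (some ((p : Nat) : Int))
          (some (((p : Nat) : Int) + PySem.Str.len (words.getD t ""))) == words.getD t "")) with
    | false =>
      simp only [Bool.false_eq_true, if_false]
      refine ⟨hlenE, ?_⟩
      intro k hk
      rw [hinvE k hk]
      have hnC : ¬ (mask.testBit t = false ∧ WMatch str.toList words t p) := by
        rw [← cond_iff str words mask t p, hC]; simp
      constructor
      · rintro (h | ⟨j, hj, h2, h3, h4⟩)
        · exact Or.inl h
        · exact Or.inr ⟨j, by omega, h2, h3, h4⟩
      · rintro (h | ⟨j, hj, h2, h3, h4⟩)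
        · exact Or.inl h
        · rcases Nat.lt_succ_iff_lt_or_eq.mp hj with hj' | rfl
          · exact Or.inr ⟨j, hj', h2, h3, h4⟩
          · exact absurd ⟨h2, h3⟩ hnC
    | true =>
      simp only [if_true]
      obtain ⟨hbt, hwm⟩ := (cond_iff str words mask t p).mp hC
      have htarget : mask ||| (1 <<< t) < 2 ^ words.length := by
        rw [Nat.one_shiftLeft]
        exact Nat.or_lt_two_pow hmask (Nat.pow_lt_pow_right (by norm_num) (by omega))
      refine ⟨by rw [List.length_set]; exact hlenE, ?_⟩
      intro k hk
      by_cases hkt : k = mask ||| (1 <<< t)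
      · subst hkt
        rw [List.getD_eq_getElem?_getD, List.getElem?_set_self (by rw [hlenE]; exact htarget)]
        simp only [Option.getD_some]
        constructor
        · intro _
          exact Or.inr ⟨t, by omega, hbt, hwm, rfl⟩
        · intro _; trivial
      · rw [List.getD_eq_getElem?_getD, List.getElem?_set_ne (fun h => hkt h.symm),
            ← List.getD_eq_getElem?_getD, hinvE k hk]
        constructor
        · rintro (h | ⟨j, hj, h2, h3, h4⟩)
          · exact Or.inl h
          · exact Or.inr ⟨j, by omega, h2, h3, h4⟩
        · rintro (h | ⟨j, hj, h2, h3, h4⟩)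
          · exact Or.inl h
          · rcases Nat.lt_succ_iff_lt_or_eq.mp hj with hj' | rfl
            · exact Or.inr ⟨j, hj', h2, h3, h4⟩
            · exact absurd h4 hkt

-- for a fully processed mask GoodUpTo collapses to OKm
theorem goodUpTo_iff_okm {s : List Char} {words : List String} {n m k : Nat}
    (hk : k < 2 ^ n) (hkm : k ≤ m) : GoodUpTo s words n m k ↔ OKm s words n k := by
  rw [okm_rec hk]
  unfold GoodUpTo
  constructor
  · rintro (rfl | ⟨j, m', hj, hb, rfl, _, hok, hwm⟩)
    · exact Or.inl rfl
    · exact Or.inr ⟨j, m', hj, hb, rfl, hok, hwm⟩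
  · rintro (rfl | ⟨j, m', hj, hb, rfl, hok, hwm⟩)
    · exact Or.inl rfl
    · exact Or.inr ⟨j, m', hj, hb, rfl, lt_of_lt_of_le (lt_or_shift hb) hkm, hok, hwm⟩

theorem dp_inv (str : String) (words : List String) :
    ∀ m, m ≤ 2 ^ words.length →
    ((List.range m).foldl (altStep str words)
        ((List.replicate (2 ^ words.length) false).set 0 true)).length = 2 ^ words.length ∧
    ∀ k, k < 2 ^ words.length →
      (((List.range m).foldl (altStep str words)
          ((List.replicate (2 ^ words.length) false).set 0 true)).getD k false = true ↔
        GoodUpTo str.toList words words.length m k) := by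
  intro m
  induction m with
  | zero =>
    intro _
    constructor
    · simp
    · intro k hk
      simp only [List.range_zero, List.foldl_nil]
      rw [dp0_getD _ _ hk]
      unfold GoodUpTo
      constructor
      · intro h
        exact Or.inl (by simpa using h)
      · rintro (rfl | ⟨j, m', _, _, _, hm', _⟩)
        · simp
        · omega
  | succ m IH =>
    intro hm1
    obtain ⟨hlen, hinv⟩ := IH (by omega)
    have hmlt : m < 2 ^ words.length := by omega
    rw [List.range_succ, List.foldl_append, List.foldl_cons, List.foldl_nil]
    have hdpm := hinv m hmlt
    have hOk : GoodUpTo str.toList words words.length m m ↔ OKm str.toList words words.length m :=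
      goodUpTo_iff_okm hmlt le_rfl
    cases hb : (((List.range m).foldl (altStep str words)
        ((List.replicate (2 ^ words.length) false).set 0 true)).getD m false) with
    | false =>
      simp only [altStep, hb, Bool.false_eq_true, if_false]
      have hnok : ¬ OKm str.toList words words.length m := fun h => by
        have hcontra := hdpm.mpr (hOk.mpr h)
        rw [hb] at hcontra
        exact Bool.false_ne_true hcontra
      refine ⟨hlen, ?_⟩
      intro k hk
      rw [hinv k hk]
      unfold GoodUpTo
      constructor
      · rintro (rfl | ⟨j, m', hj, hb', rfl, hlt, hok, hwm⟩)
        · exact Or.inl rfl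
        · exact Or.inr ⟨j, m', hj, hb', rfl, by omega, hok, hwm⟩
      · rintro (rfl | ⟨j, m', hj, hb', rfl, hlt, hok, hwm⟩)
        · exact Or.inl rfl
        · rcases Nat.lt_succ_iff_lt_or_eq.mp hlt with hlt' | rfl
          · exact Or.inr ⟨j, m', hj, hb', rfl, hlt', hok, hwm⟩
          · exact absurd hok hnok
    | true =>
      simp only [altStep, hb, if_true]
      have hokm : OKm str.toList words words.length m := hOk.mp (hdpm.mp hb)
      rw [altPos_eq words m]
      unfold altInner
      have hii := inner_inv str words m (bpos words words.length m) hmlt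
        words.length le_rfl _ hlen _ hinv
      refine ⟨hii.1, ?_⟩
      intro k hk
      rw [hii.2 k hk]
      unfold GoodUpTo
      constructor
      · rintro (h | ⟨j, hj, hb', hwm, rfl⟩)
        · rcases h with rfl | ⟨j, m', hj, hb', rfl, hlt, hok, hwm⟩
          · exact Or.inl rfl
          · exact Or.inr ⟨j, m', hj, hb', rfl, by omega, hok, hwm⟩
        · exact Or.inr ⟨j, m, hj, hb', rfl, by omega, hokm, hwm⟩
      · rintro (rfl | ⟨j, m', hj, hb', rfl, hlt, hok, hwm⟩)
        · exact Or.inl (Or.inl rfl)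
        · rcases Nat.lt_succ_iff_lt_or_eq.mp hlt with hlt' | rfl
          · exact Or.inl (Or.inr ⟨j, m', hj, hb', rfl, hlt', hok, hwm⟩)
          · exact Or.inr ⟨j, hj, hb', hwm, rfl⟩

theorem solveB_iff (str : String) (words : List String) :
    Solve_alt str words = true ↔
      ((words.map (fun w => w.toList.length)).sum = str.toList.length ∧
        OKm str.toList words words.length (2 ^ words.length - 1)) := by
  have hsum : (words.map PySem.Str.len).sum
      = (((words.map (fun w => w.toList.length)).sum : Nat) : Int) := by
    have h1 : words.map PySem.Str.len = words.map (fun w => ((w.toList.length : Nat) : Int)) := by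
      apply List.map_congr_left; intro w _; simp
    rw [h1]
    push_cast
    rw [List.map_map]
    rfl
  have hlen : PySem.Str.len str = ((str.toList.length : Nat) : Int) := by simp
  unfold Solve_alt
  by_cases hg : (words.map (fun w => w.toList.length)).sum = str.toList.length
  · have hcond : ((words.map PySem.Str.len).sum != PySem.Str.len str) = false := by
      rw [hsum, hlen, hg]; simp
    rw [hcond, if_neg (by simp)]
    obtain ⟨_, hinv⟩ := dp_inv str words (2 ^ words.length) le_rfl
    have hfull : 2 ^ words.length - 1 < 2 ^ words.length :=
      Nat.sub_lt (Nat.two_pow_pos _) one_pos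
    rw [hinv _ hfull, goodUpTo_iff_okm hfull (by omega)]
    exact ⟨fun h => ⟨hg, h⟩, fun h => h.2⟩
  · have hcond : ((words.map PySem.Str.len).sum != PySem.Str.len str) = true := by
      rw [hsum, hlen]
      simp only [bne_iff_ne, ne_eq, Nat.cast_inj]
      exact hg
    rw [hcond, if_pos rfl]
    simp only [Bool.false_eq_true, false_iff]
    rintro ⟨h, _⟩
    exact hg h

-- lift a permutation through map: a permutation of mapped values comes from index values
theorem perm_map_lift {α β : Type} [DecidableEq β] (f : α → β) :
    ∀ (ys : List β) (xs : List α), ys.Perm (xs.map f) → ∃ zs : List α, zs.Perm xs ∧ zs.map f = ys := by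
  intro ys
  induction ys with
  | nil =>
    intro xs hp
    rw [List.map_eq_nil_iff.mp (List.perm_nil.mp hp.symm)]
    exact ⟨[], List.Perm.refl _, rfl⟩
  | cons y ys IH =>
    intro xs hp
    have hy : y ∈ xs.map f := hp.mem_iff.mp List.mem_cons_self
    have hk : (xs.map f).idxOf y < xs.length := by
      have := List.idxOf_lt_length_of_mem hy
      simpa using this
    have hys : ys.Perm ((xs.map f).erase y) := (List.cons_perm_iff_perm_erase.mp hp).2
    rw [List.erase_eq_eraseIdx_of_idxOf rfl, List.eraseIdx_map] at hys
    obtain ⟨zs, hzp, hzm⟩ := IH _ hys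
    refine ⟨xs[(xs.map f).idxOf y] :: zs, ?_, ?_⟩
    · exact (hzp.cons _).trans (List.getElem_cons_eraseIdx_perm hk)
    · simp only [List.map_cons, hzm]
      congr 1
      have h2 := List.getElem_idxOf (List.idxOf_lt_length_of_mem hy)
      rw [List.getElem_map] at h2
      exact h2

theorem range_map_getD (words : List String) :
    (List.range words.length).map (fun j => words.getD j "") = words := by
  apply List.ext_getElem
  · simp
  · intro i h1 h2
    simp [List.getD_eq_getElem?_getD, List.getElem?_eq_getElem h2]

theorem bidx_full (n : Nat) : bidx n (2 ^ n - 1) = List.range n := by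
  unfold bidx
  rw [List.filter_eq_self]
  intro a ha
  simp [Nat.testBit_two_pow_sub_one, List.mem_range.mp ha]

theorem bpos_full (words : List String) :
    bpos words words.length (2 ^ words.length - 1)
      = (words.map (fun w => w.toList.length)).sum := by
  unfold bpos
  rw [bidx_full]
  have : (List.range words.length).map (wlen words)
      = ((List.range words.length).map (fun j => words.getD j "")).map
          (fun w => w.toList.length) := by
    rw [List.map_map]; rfl
  rw [this, range_map_getD]

theorem concatPerm_iff (str : String) (words : List String) :
    ConcatPerm str.toList words ↔
      ((words.map (fun w => w.toList.length)).sum = str.toList.length ∧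
        OKm str.toList words words.length (2 ^ words.length - 1)) := by
  constructor
  · rintro ⟨l, hperm, hflat⟩
    have hsum : (words.map (fun w => w.toList.length)).sum = str.toList.length := by
      have := congrArg List.length hflat
      rw [List.length_flatten, List.map_map] at this
      rw [← this]
      exact ((hperm.map (fun w => w.toList.length)).sum_eq).symm
    refine ⟨hsum, ?_⟩
    obtain ⟨zs, hzp, hzm⟩ := perm_map_lift (fun j => words.getD j "") l (List.range words.length)
      (by rw [range_map_getD]; exact hperm)
    refine ⟨zs, by rw [bidx_full]; exact hzp, ?_⟩
    rw [bpos_full, hsum, List.take_length]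
    calc (zs.map (fun j => (words.getD j "").toList)).flatten
        = ((zs.map (fun j => words.getD j "")).map String.toList).flatten := by
          rw [List.map_map]; rfl
      _ = str.toList := by rw [hzm]; exact hflat
  · rintro ⟨hsum, l, hperm, hflat⟩
    rw [bidx_full] at hperm
    rw [bpos_full, hsum, List.take_length] at hflat
    refine ⟨l.map (fun j => words.getD j ""), ?_, ?_⟩
    · have := hperm.map (fun j => words.getD j "")
      rwa [range_map_getD] at this
    · rw [List.map_map]
      exact hflat

-- ===== VERDICT (by name: the statement is the Claim_ definition above) =====
theorem Solve_spec : Claim_equal_Solve := by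
  intro s ws _
  unfold Spec_Solve
  rw [Bool.eq_iff_iff]
  exact (solveA_iff (ws.length + 1) ws (by omega) s).trans
    ((concatPerm_iff s ws).trans (solveB_iff s ws).symm)
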